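-- pv_equiv track=rewrite | github.com/shaunrask/block-the-pig-solver | block-the-pig-logic-ai/src/logic_ai.py | bfs_escape
-- ===== SOURCE A (Python) =====
-- import collections
--
-- def get_neighbors(q, r):
--     # odd-r offset neighbors logic from game.js
--     # But wait, game.js uses "odd-r" (horizontal layout)?
--     # Let's check game.js again.
--     # "Odd-row neighbors (pointy-top, redblobgames 'odd-r' horizontal layout)"
--     # dirsEven = [[1,0], [0,-1], [-1,-1], [-1,0], [-1,1], [0,1]]
--     # dirsOdd  = [[1,0], [1,-1], [0,-1], [-1,0], [0,1], [1,1]]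
--
--     is_odd = (r % 2 == 1)
--     if is_odd:
--         directions = [
--             (1, 0), (1, -1), (0, -1),
--             (-1, 0), (0, 1), (1, 1)
--         ]
--     else:
--         directions = [
--             (1, 0), (0, -1), (-1, -1),
--             (-1, 0), (-1, 1), (0, 1)
--         ]
--
--     return [(q + dq, r + dr) for dq, dr in directions]
--
-- def is_valid(q, r):
--     return 0 <= q <= 4 and 0 <= r <= 10
--
-- def is_escape(q, r):
--     return q == 0 or q == 4 or r == 0 or r == 10
--
-- def bfs_escape(start_node, walls):
--     # Returns path to escape or None
--     queue = collections.deque([[start_node]])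
--     visited = {start_node}
--
--     while queue:
--         path = queue.popleft()
--         curr = path[-1]
--
--         if is_escape(curr[0], curr[1]):
--             return path
--
--         for n in get_neighbors(curr[0], curr[1]):
--             if is_valid(n[0], n[1]) and n not in walls and n not in visited:
--                 visited.add(n)
--                 new_path = list(path)
--                 new_path.append(n)
--                 queue.append(new_path)
--
--     return None
-- ===== SOURCE B (Python) =====
-- import collections
--
-- def get_neighbors(q, r):
--     is_odd = (r % 2 == 1)
--     if is_odd:
--         directions = [
--             (1, 0), (1, -1), (0, -1),
--             (-1, 0), (0, 1), (1, 1)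
--         ]
--     else:
--         directions = [
--             (1, 0), (0, -1), (-1, -1),
--             (-1, 0), (-1, 1), (0, 1)
--         ]
--     return [(q + dq, r + dr) for dq, dr in directions]
--
-- def is_valid(q, r):
--     return 0 <= q <= 4 and 0 <= r <= 10
--
-- def is_escape(q, r):
--     return q == 0 or q == 4 or r == 0 or r == 10
--
-- def bfs_escape(start_node, walls):
--     # Parent-pointer BFS: enqueue bare nodes, reconstruct the path at the end.
--     queue = collections.deque([start_node])
--     visited = {start_node}
--     parent = {start_node: None}
--
--     while queue:
--         curr = queue.popleft()
--
--         if is_escape(curr[0], curr[1]):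
--             path = []
--             node = curr
--             while node is not None:
--                 path.append(node)
--                 node = parent[node]
--             path.reverse()
--             return path
--
--         for n in get_neighbors(curr[0], curr[1]):
--             if is_valid(n[0], n[1]) and n not in walls and n not in visited:
--                 visited.add(n)
--                 parent[n] = curr
--                 queue.append(n)
--
--     return None
-- ===== Notes on version B (the rewrite author's own statement) =====
-- stated objective: simpler
-- what changed: A enqueues whole paths (copying the path for every enqueued node); B enqueues bare nodes and keeps a parent-pointer dict, reconstructing the path once at the escape node.
import Mathlib
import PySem

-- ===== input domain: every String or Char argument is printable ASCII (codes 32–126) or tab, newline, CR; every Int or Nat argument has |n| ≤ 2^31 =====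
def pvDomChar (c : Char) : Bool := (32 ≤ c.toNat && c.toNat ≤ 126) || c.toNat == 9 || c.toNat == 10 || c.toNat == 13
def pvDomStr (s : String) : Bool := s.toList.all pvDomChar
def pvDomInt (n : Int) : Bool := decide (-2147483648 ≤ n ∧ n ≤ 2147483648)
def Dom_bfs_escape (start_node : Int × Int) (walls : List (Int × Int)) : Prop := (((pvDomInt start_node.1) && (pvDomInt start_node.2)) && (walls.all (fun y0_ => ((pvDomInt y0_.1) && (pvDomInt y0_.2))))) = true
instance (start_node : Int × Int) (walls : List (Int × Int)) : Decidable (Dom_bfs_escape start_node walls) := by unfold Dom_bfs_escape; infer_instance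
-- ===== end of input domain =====

-- B replaces A's queue-of-full-paths BFS by a parent-pointer BFS over bare nodes
-- (path reconstructed once at the escape node): simpler queue state, same result.

-- ===== PORT A =====
-- shared module helpers (used by both Python versions)
def get_neighbors (q r : Int) : List (Int × Int) :=
  let is_odd : Bool := PySem.Int.mod r 2 == 1
  let directions : List (Int × Int) :=
    if is_odd then [(1, 0), (1, -1), (0, -1), (-1, 0), (0, 1), (1, 1)]
    else [(1, 0), (0, -1), (-1, -1), (-1, 0), (-1, 1), (0, 1)]
  directions.map (fun d => (q + d.1, r + d.2))

def is_valid (q r : Int) : Bool := decide (0 ≤ q ∧ q ≤ 4 ∧ 0 ≤ r ∧ r ≤ 10)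

def is_escape (q r : Int) : Bool := q == 0 || q == 4 || r == 0 || r == 10

-- A's while loop, fueled (the fuel 200 exceeds the number of possible queue pops: each
-- pop matches one enqueue, and at most 1 + 55 nodes are ever enqueued on the 5×11 grid)
def bfsA_loop (walls : List (Int × Int)) :
    Nat → List (List (Int × Int)) → PySem.Set (Int × Int) → Option (List (Int × Int))
  | 0, _, _ => none
  | _ + 1, [], _ => none
  | fuel + 1, path :: rest, visited =>
    match PySem.List.pyGet? path (-1) with
    | none => none  -- unreachable: every queued path is nonempty (Python would raise IndexError)
    | some curr =>
      if is_escape curr.1 curr.2 then some path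
      else
        let st := (get_neighbors curr.1 curr.2).foldl
          (fun (st : List (List (Int × Int)) × PySem.Set (Int × Int)) n =>
            if is_valid n.1 n.2 && !(walls.contains n) && !(PySem.Set.contains st.2 n) then
              (st.1 ++ [path ++ [n]], PySem.Set.add st.2 n)
            else st) (rest, visited)
        bfsA_loop walls fuel st.1 st.2

def bfs_escape (start_node : Int × Int) (walls : List (Int × Int)) : Option (List (Int × Int)) :=
  bfsA_loop walls 200 [[start_node]] (PySem.Set.ofList [start_node])

-- ===== PORT B =====
-- B's path reconstruction: follow parent links (appending, then the reverse is folded in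
-- by the accumulator), fueled like the main loop (chains are shorter than 200)
def rebuild (parent : PySem.Dict (Int × Int) (Option (Int × Int))) :
    Nat → Int × Int → List (Int × Int) → List (Int × Int)
  | 0, x, acc => x :: acc
  | f + 1, x, acc =>
    match parent.get? x with
    | some (some p) => rebuild parent f p (x :: acc)
    | _ => x :: acc

def bfsB_loop (walls : List (Int × Int)) :
    Nat → List (Int × Int) → PySem.Set (Int × Int) →
    PySem.Dict (Int × Int) (Option (Int × Int)) → Option (List (Int × Int))
  | 0, _, _, _ => none
  | _ + 1, [], _, _ => none
  | fuel + 1, curr :: rest, visited, parent =>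
    if is_escape curr.1 curr.2 then some (rebuild parent 200 curr [])
    else
      let st := (get_neighbors curr.1 curr.2).foldl
        (fun (st : List (Int × Int) × PySem.Set (Int × Int) × PySem.Dict (Int × Int) (Option (Int × Int))) n =>
          if is_valid n.1 n.2 && !(walls.contains n) && !(PySem.Set.contains st.2.1 n) then
            (st.1 ++ [n], PySem.Set.add st.2.1 n, st.2.2.insert n (some curr))
          else st) (rest, visited, parent)
      bfsB_loop walls fuel st.1 st.2.1 st.2.2

def bfs_escape_alt (start_node : Int × Int) (walls : List (Int × Int)) : Option (List (Int × Int)) :=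
  bfsB_loop walls 200 [start_node] (PySem.Set.ofList [start_node])
    (PySem.Dict.ofList [(start_node, none)])

-- ===== PRECONDITION & SPEC =====
def Spec_bfs_escape (start_node : Int × Int) (walls : List (Int × Int)) (out : Option (List (Int × Int))) : Prop := out = bfs_escape_alt start_node walls
instance (start_node : Int × Int) (walls : List (Int × Int)) (out : Option (List (Int × Int))) : Decidable (Spec_bfs_escape start_node walls out) := by unfold Spec_bfs_escape; infer_instance

-- ===== CLAIM (what is proved, stated in full; the proofs are below) =====
def Claim_equal_bfs_escape : Prop := ∀ (start_node : Int × Int) (walls : List (Int × Int)), Dom_bfs_escape start_node walls → Spec_bfs_escape start_node walls (bfs_escape start_node walls)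

-- ===== LEMMAS AND PROOFS =====

-- the 55 valid cells of the grid
def gridCells : List (Int × Int) :=
  (PySem.List.pyRange 0 5 1).flatMap (fun q => (PySem.List.pyRange 0 11 1).map (fun r => (q, r)))

lemma mem_gridCells_of_valid {n : Int × Int} (h : is_valid n.1 n.2 = true) : n ∈ gridCells := by
  obtain ⟨a, b⟩ := n
  simp only [is_valid, decide_eq_true_eq] at h
  simp only [gridCells, List.mem_flatMap, List.mem_map, PySem.List.mem_pyRange_one]
  exact ⟨a, by omega, b, by omega, rfl⟩

lemma nodup_subset_length {l₁ l₂ : List (Int × Int)} (h : l₁.Nodup) (hs : l₁ ⊆ l₂) :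
    l₁.length ≤ l₂.length :=
  calc l₁.length = l₁.toFinset.card := (List.toFinset_card_of_nodup h).symm
    _ ≤ l₂.toFinset.card := Finset.card_le_card (by intro x hx; simp at hx ⊢; exact hs hx)
    _ ≤ l₂.length := l₂.toFinset_card_le

-- a reversed path (current node first) consistent with the parent dictionary
def RChain (d : PySem.Dict (Int × Int) (Option (Int × Int))) : List (Int × Int) → Prop
  | [] => False
  | [x] => d.get? x = some none
  | x :: y :: t => d.get? x = some (some y) ∧ RChain d (y :: t)

-- the relation between one of A's queued paths and one of B's queued nodes
def PathRel (d : PySem.Dict (Int × Int) (Option (Int × Int))) (v : PySem.Set (Int × Int))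
    (p : List (Int × Int)) (x : Int × Int) : Prop :=
  ∃ rp : List (Int × Int), p = rp.reverse ∧ rp.head? = some x ∧ RChain d rp ∧
    rp.Nodup ∧ ∀ y ∈ rp, y ∈ v

lemma rebuild_eq (d : PySem.Dict (Int × Int) (Option (Int × Int))) :
    ∀ (rp : List (Int × Int)) (f : Nat) (x : Int × Int) (acc : List (Int × Int)),
      RChain d rp → rp.head? = some x → rp.length ≤ f →
      rebuild d f x acc = rp.reverse ++ acc
  | [], _, _, _, hc, _, _ => absurd hc (by simp [RChain])
  | [z], f, x, acc, hc, hh, hl => by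
    obtain rfl : z = x := by simpa using hh
    obtain ⟨f', rfl⟩ : ∃ f', f = f' + 1 := ⟨f - 1, by simp at hl; omega⟩
    simp only [RChain] at hc
    simp [rebuild, hc]
  | z :: y :: t, f, x, acc, hc, hh, hl => by
    obtain rfl : z = x := by simpa using hh
    obtain ⟨f', rfl⟩ : ∃ f', f = f' + 1 := ⟨f - 1, by simp at hl; omega⟩
    obtain ⟨h1, h2⟩ := hc
    have hrec := rebuild_eq d (y :: t) f' y (z :: acc) h2 rfl (by simp at hl ⊢; omega)
    simp [rebuild, h1, hrec]

lemma RChain_insert {d : PySem.Dict (Int × Int) (Option (Int × Int))}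
    {n : Int × Int} {v : Option (Int × Int)} :
    ∀ {rp : List (Int × Int)}, (∀ y ∈ rp, y ≠ n) → RChain d rp → RChain (d.insert n v) rp
  | [], _, hc => hc
  | [z], hne, hc => by
    simp only [RChain] at hc ⊢
    rw [PySem.Dict.get?_insert_of_ne _ _ (hne z (by simp))]
    exact hc
  | z :: y :: t, hne, hc => by
    obtain ⟨h1, h2⟩ := hc
    exact ⟨by rw [PySem.Dict.get?_insert_of_ne _ _ (hne z (by simp))]; exact h1,
      RChain_insert (fun a ha => hne a (List.mem_cons_of_mem _ ha)) h2⟩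

-- state invariant of the two neighbor folds
lemma fold_inv (walls : List (Int × Int)) (s curr : Int × Int) (p : List (Int × Int)) :
    ∀ (ns : List (Int × Int)) (qA : List (List (Int × Int))) (qB : List (Int × Int))
      (v : PySem.Set (Int × Int)) (d : PySem.Dict (Int × Int) (Option (Int × Int))),
      PathRel d v p curr → List.Forall₂ (PathRel d v) qA qB →
      (∀ k, d.contains k = true → k ∈ v) → (∀ y ∈ v, y ∈ s :: gridCells) →
      let ra := ns.foldl (fun (st : List (List (Int × Int)) × PySem.Set (Int × Int)) n =>
          if is_valid n.1 n.2 && !(walls.contains n) && !(PySem.Set.contains st.2 n) then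
            (st.1 ++ [p ++ [n]], PySem.Set.add st.2 n)
          else st) (qA, v)
      let rb := ns.foldl (fun (st : List (Int × Int) × PySem.Set (Int × Int) × PySem.Dict (Int × Int) (Option (Int × Int))) n =>
          if is_valid n.1 n.2 && !(walls.contains n) && !(PySem.Set.contains st.2.1 n) then
            (st.1 ++ [n], PySem.Set.add st.2.1 n, st.2.2.insert n (some curr))
          else st) (qB, v, d)
      ra.2 = rb.2.1 ∧ List.Forall₂ (PathRel rb.2.2 rb.2.1) ra.1 rb.1 ∧
        (∀ k, rb.2.2.contains k = true → k ∈ rb.2.1) ∧ (∀ y ∈ rb.2.1, y ∈ s :: gridCells) := by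
  intro ns
  induction ns with
  | nil =>
    intro qA qB v d h0 h1 h2 h3
    exact ⟨rfl, h1, h2, h3⟩
  | cons n ns ih =>
    intro qA qB v d h0 h1 h2 h3
    by_cases hcond : (is_valid n.1 n.2 && !(walls.contains n) && !(PySem.Set.contains v n)) = true
    · -- the neighbor n is new: both sides enqueue it
      obtain ⟨⟨hval, -⟩, hnc⟩ := by simpa only [Bool.and_eq_true, Bool.not_eq_eq_eq_not,
        Bool.not_true] using hcond
      have hnv : n ∉ v := by simp [PySem.Set.contains] at hnc; exact hnc
      have hne_of_mem : ∀ y, y ∈ v → y ≠ n := fun y hy heq => hnv (heq ▸ hy)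
      -- pointwise preservation of PathRel under the new insert / add
      have hpres : ∀ q x, PathRel d v q x →
          PathRel (d.insert n (some curr)) (PySem.Set.add v n) q x := by
        rintro q x ⟨rp, hq, hh, hc, hnd, hsub⟩
        exact ⟨rp, hq, hh, RChain_insert (fun y hy => hne_of_mem y (hsub y hy)) hc, hnd,
          fun y hy => (PySem.Set.mem_add ..).mpr (Or.inl (hsub y hy))⟩
      -- the new queue entries are related
      have hnew : PathRel (d.insert n (some curr)) (PySem.Set.add v n) (p ++ [n]) n := by
        obtain ⟨rp, hq, hh, hc, hnd, hsub⟩ := h0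
        cases rp with
        | nil => simp at hh
        | cons z t =>
          obtain rfl : z = curr := by simpa using hh
          refine ⟨n :: z :: t, by simp [hq], rfl, ?_, ?_, ?_⟩
          · exact ⟨PySem.Dict.get?_insert_self _ _ _,
              RChain_insert (fun y hy => hne_of_mem y (hsub y hy)) hc⟩
          · exact List.Nodup.cons (fun hmem => hnv (hsub n hmem)) hnd
          · intro y hy
            rcases List.mem_cons.mp hy with rfl | hy
            · exact (PySem.Set.mem_add ..).mpr (Or.inr rfl)
            · exact (PySem.Set.mem_add ..).mpr (Or.inl (hsub y hy))
      simp only [List.foldl_cons, hcond, if_true]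
      exact ih (qA ++ [p ++ [n]]) (qB ++ [n]) (PySem.Set.add v n) (d.insert n (some curr))
        (hpres p curr h0)
        (List.rel_append (h1.imp hpres)
          (List.Forall₂.cons hnew List.Forall₂.nil))
        (by
          intro k hk
          rw [PySem.Dict.contains_insert] at hk
          rcases Bool.or_eq_true_iff.mp hk with hk | hk
          · exact (PySem.Set.mem_add ..).mpr (Or.inr (by simpa using hk))
          · exact (PySem.Set.mem_add ..).mpr (Or.inl (h2 k hk)))
        (by
          intro y hy
          rcases (PySem.Set.mem_add ..).mp hy with hy | rfl
          · exact h3 y hy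
          · exact List.mem_cons_of_mem _ (mem_gridCells_of_valid hval))
    · have hcond' : (is_valid n.1 n.2 && !(walls.contains n) && !(PySem.Set.contains v n)) = false :=
        Bool.not_eq_true _ ▸ (by simpa using hcond)
      simp only [List.foldl_cons, hcond']
      exact ih qA qB v d h0 h1 h2 h3

lemma loop_eq (walls : List (Int × Int)) (s : Int × Int) :
    ∀ (fuel : Nat) (qA : List (List (Int × Int))) (qB : List (Int × Int))
      (v : PySem.Set (Int × Int)) (d : PySem.Dict (Int × Int) (Option (Int × Int))),
      List.Forall₂ (PathRel d v) qA qB →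
      (∀ k, d.contains k = true → k ∈ v) → (∀ y ∈ v, y ∈ s :: gridCells) →
      bfsA_loop walls fuel qA v = bfsB_loop walls fuel qB v d := by
  intro fuel
  induction fuel with
  | zero => intro qA qB v d _ _ _; rfl
  | succ f ih =>
    intro qA qB v d h1 h2 h3
    cases h1 with
    | nil => rfl
    | @cons p x qA' qB' hpx htail =>
      obtain ⟨rp, hp, hh, hc, hnd, hsub⟩ := hpx
      cases rp with
      | nil => simp at hh
      | cons x' t =>
        obtain rfl : x' = x := by simpa using hh
        have hlast : PySem.List.pyGet? p (-1) = some x' := by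
          rw [hp, List.reverse_cons]
          exact PySem.List.pyGet?_neg_one_append_singleton t.reverse x'
        by_cases hesc : is_escape x'.1 x'.2 = true
        · -- both return the path ending at the escape node
          have h56 : (x' :: t).length ≤ 200 := by
            have hle : (x' :: t).length ≤ (s :: gridCells).length :=
              nodup_subset_length hnd (fun y hy => h3 y (hsub y hy))
            have h55 : gridCells.length = 55 := by decide
            simp [h55] at hle
            simp; omega
          simp only [bfsA_loop, bfsB_loop, hlast, hesc, if_true]
          rw [rebuild_eq d (x' :: t) 200 x' [] hc rfl h56]
          simp [hp]
        · have hesc' : is_escape x'.1 x'.2 = false := by simpa using hesc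
          simp only [bfsA_loop, bfsB_loop, hlast, hesc', Bool.false_eq_true, if_false]
          obtain ⟨hv, hfa, hkeys, hbound⟩ :=
            fold_inv walls s x' p (get_neighbors x'.1 x'.2) qA' qB' v d
              ⟨x' :: t, hp, rfl, hc, hnd, hsub⟩ htail h2 h3
          rw [hv]
          exact ih _ _ _ _ hfa hkeys hbound

-- ===== VERDICT (by name: the statement is the Claim_ definition above) =====
theorem bfs_escape_spec : Claim_equal_bfs_escape := by
  intro start walls _
  unfold Spec_bfs_escape bfs_escape bfs_escape_alt
  apply loop_eq walls start
  · refine List.Forall₂.cons ⟨[start], by simp, rfl, ?_, by simp, ?_⟩ List.Forall₂.nil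
    · show (PySem.Dict.ofList [(start, none)]).get? start = some none
      simp [PySem.Dict.ofList, PySem.Dict.update, PySem.Dict.get?_insert_self]
    · intro y hy
      rw [PySem.Set.mem_ofList]
      simpa using hy
  · intro k hk
    rw [PySem.Set.mem_ofList]
    simp [PySem.Dict.ofList, PySem.Dict.update, PySem.Dict.contains_insert,
      PySem.Dict.contains_empty] at hk
    simp [hk]
  · intro y hy
    rw [PySem.Set.mem_ofList] at hy
    simp at hy
    simp [hy]
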